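-- pv_equiv track=rewrite | github.com/marimemad/Algorithms-and-Data-Structures-training-IEEE-CS-ZSB | Day_25/GeometricProgression.py | is_less
-- ===== SOURCE A (Python) =====
-- def is_less(ind,a2,a3):
--     c=0
--     for i in range(len(a2)):
--         if a2[i]>ind:
--             for j in range(len(a3)):
--                 if a3[j]>a2[i]:
--                     c+=1
--
--     return(c)
-- ===== SOURCE B (Python) =====
-- def is_less(ind, a2, a3):
--     # Sort a3 once, then count elements greater than each qualifying a2 value
--     # with a hand-written bisect_right (binary search).
--     s = sorted(a3)
--     m = len(s)
--     total = 0
--     for x in a2: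
--         if x > ind:
--             lo, hi = 0, m
--             while lo < hi:
--                 mid = (lo + hi) // 2
--                 if x < s[mid]:
--                     hi = mid
--                 else:
--                     lo = mid + 1
--             total += m - lo
--     return total
-- ===== Notes on version B (the rewrite author's own statement) =====
-- stated objective: faster
-- what changed: Replaced the nested scan of a3 for every qualifying a2 element by sorting a3 once and counting the greater elements with a binary search (bisect_right).
import Mathlib
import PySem

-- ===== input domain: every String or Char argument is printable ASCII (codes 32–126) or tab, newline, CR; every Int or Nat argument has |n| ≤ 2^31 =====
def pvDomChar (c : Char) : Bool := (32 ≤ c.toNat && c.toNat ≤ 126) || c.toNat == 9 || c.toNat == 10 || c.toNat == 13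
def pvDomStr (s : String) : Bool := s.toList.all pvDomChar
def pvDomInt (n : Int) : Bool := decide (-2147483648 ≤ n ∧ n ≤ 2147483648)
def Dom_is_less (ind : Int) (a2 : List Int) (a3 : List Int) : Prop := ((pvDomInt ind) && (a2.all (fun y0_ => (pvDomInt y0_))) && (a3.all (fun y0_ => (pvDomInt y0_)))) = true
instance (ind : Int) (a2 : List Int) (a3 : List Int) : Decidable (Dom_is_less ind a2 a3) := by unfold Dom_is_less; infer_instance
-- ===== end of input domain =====

-- B sorts a3 once and counts the greater elements with a binary search instead of
-- rescanning a3 for every qualifying a2 element (objective: faster, O(n*m) → O((n+m) log m)).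

-- ===== PORT A =====
-- literal port of A: for i in range(len(a2)): if a2[i] > ind: for j in range(len(a3)): if a3[j] > a2[i]: c += 1
def is_less (ind : Int) (a2 : List Int) (a3 : List Int) : Int :=
  (PySem.List.pyRange 0 (PySem.List.len a2)).foldl
    (fun c i =>
      if PySem.List.pyGetD a2 i 0 > ind then
        (PySem.List.pyRange 0 (PySem.List.len a3)).foldl
          (fun c2 j => if PySem.List.pyGetD a3 j 0 > PySem.List.pyGetD a2 i 0 then c2 + 1 else c2) c
      else c) 0

-- ===== PORT B =====
-- literal port of Source B: s = sorted(a3); the hand-written while loop is exactly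
-- bisect_right (PySem.List.bisectRight, the prelude's transcription of that loop).
def is_less_alt (ind : Int) (a2 : List Int) (a3 : List Int) : Int :=
  let s := PySem.List.sorted a3 (fun y => y) false
  let m := s.length
  a2.foldl
    (fun total x =>
      if x > ind then total + ((m : Int) - (PySem.List.bisectRight s x : Int)) else total) 0

-- ===== PRECONDITION & SPEC =====
def Spec_is_less (ind : Int) (a2 : List Int) (a3 : List Int) (out : Int) : Prop := out = is_less_alt ind a2 a3
instance (ind : Int) (a2 : List Int) (a3 : List Int) (out : Int) : Decidable (Spec_is_less ind a2 a3 out) := by unfold Spec_is_less; infer_instance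

-- ===== CLAIM (what is proved, stated in full; the proofs are below) =====
def Claim_equal_is_less : Prop := ∀ (ind : Int) (a2 : List Int) (a3 : List Int), Dom_is_less ind a2 a3 → Spec_is_less ind a2 a3 (is_less ind a2 a3)

-- ===== LEMMAS AND PROOFS =====

-- A's inner loop is a count of the elements of l greater than x.
theorem foldl_count_gt (x : Int) (l : List Int) (c : Int) :
    l.foldl (fun acc y => if y > x then acc + 1 else acc) c
      = c + (l.countP (fun y => decide (x < y)) : Int) := by
  induction l generalizing c with
  | nil => simp
  | cons y t ih =>
    by_cases h : x < y <;> simp [h, ih] <;> ring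

-- On a (≤)-sorted list, len - bisect_right x counts the elements greater than x.
theorem count_gt_of_sorted (s : List Int) (x : Int) (hs : s.Pairwise (· ≤ ·)) :
    (s.countP (fun y => decide (x < y)) : Int)
      = (s.length : Int) - (PySem.List.bisectRight s x : Int) := by
  obtain ⟨h1, h2, h3⟩ := PySem.List.bisectRight_spec s x hs
  set r := PySem.List.bisectRight s x with hr
  have htake : (s.take r).countP (fun y => decide (x < y)) = 0 := by
    rw [List.countP_eq_zero]
    intro a ha
    obtain ⟨i, hi, rfl⟩ := List.mem_iff_getElem.mp ha
    have hir : i < r := by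
      have := hi; simp [List.length_take] at this; omega
    have hil : i < s.length := by
      have := hi; simp [List.length_take] at this; omega
    have := h2 i hil hir
    simp [List.getElem_take]
    omega
  have hdrop : (s.drop r).countP (fun y => decide (x < y)) = (s.drop r).length := by
    rw [List.countP_eq_length]
    intro a ha
    obtain ⟨i, hi, rfl⟩ := List.mem_iff_getElem.mp ha
    have hil : r + i < s.length := by
      have := hi; simp [List.length_drop] at this; omega
    have := h3 (r + i) hil (Nat.le_add_right r i)
    simp [List.getElem_drop]
    omega
  have hsum : s.countP (fun y => decide (x < y))
      = (s.take r).countP (fun y => decide (x < y)) + (s.drop r).countP (fun y => decide (x < y)) := by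
    conv_lhs => rw [← List.take_append_drop r s]
    exact List.countP_append
  rw [hsum, htake, hdrop]
  simp [List.length_drop]
  omega

-- ===== VERDICT (by name: the statement is the Claim_ definition above) =====
theorem is_less_spec : Claim_equal_is_less := by
  intro ind a2 a3 _
  unfold Spec_is_less
  -- A reduces to a fold over the elements of a2 with an exact count of a3
  have hA : is_less ind a2 a3
      = a2.foldl
          (fun c x => if x > ind then c + (a3.countP (fun y => decide (x < y)) : Int) else c) 0 := by
    unfold is_less
    rw [PySem.List.foldl_pyRange_zero_pyGetD a2 0
      (fun c x => if x > ind then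
          (PySem.List.pyRange 0 (PySem.List.len a3)).foldl
            (fun c2 j => if PySem.List.pyGetD a3 j 0 > x then c2 + 1 else c2) c
        else c) 0]
    refine List.foldl_ext _ _ _ (fun c x _ => ?_)
    by_cases h : ind < x
    · simp only [h, if_pos, gt_iff_lt]
      rw [PySem.List.foldl_pyRange_zero_pyGetD a3 0
        (fun c2 y => if y > x then c2 + 1 else c2) c]
      exact foldl_count_gt x a3 c
    · simp [h]
  rw [hA]
  unfold is_less_alt
  refine List.foldl_ext _ _ _ (fun c x _ => ?_)
  by_cases h : ind < x
  · simp only [h, if_pos]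
    have hperm : a3.countP (fun y => decide (x < y))
        = (PySem.List.sorted a3 (fun y => y) false).countP (fun y => decide (x < y)) :=
      (List.Perm.countP_eq _ (PySem.List.sorted_perm a3 (fun y => y) false)).symm
    have := count_gt_of_sorted (PySem.List.sorted a3 (fun y => y) false) x
      (PySem.List.sorted_pairwise a3 (fun y => y))
    rw [hperm, this]
  · simp [h]
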